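-- pv_equiv track=rewrite | github.com/T1mofeyG0rshannikov/cms-microservice | infrastructure/url_parser/url_parser.py | is_source
-- ===== SOURCE A (Python) =====
-- def is_source(path: str) -> bool:
--     static_patterns = [
--         ".png",
--         "__debug__",
--         ".jpg",
--         ".js",
--         ".css",
--         ".scss",
--         ".webp",
--         ".WEBP",
--         ".ico",
--         ".jpeg",
--         "styles",
--         "static",
--         "media",
--     ]
--     for static_pattern in static_patterns:
--         if static_pattern in path:
--             return True
--
--     return False
-- ===== SOURCE B (Python) =====
-- def is_source(path: str) -> bool:
--     static_patterns = (
--         ".png",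
--         "__debug__",
--         ".jpg",
--         ".js",
--         ".css",
--         ".scss",
--         ".webp",
--         ".WEBP",
--         ".ico",
--         ".jpeg",
--         "styles",
--         "static",
--         "media",
--     )
--     return any(path.startswith(static_patterns, i) for i in range(len(path)))
-- ===== Notes on version B (the rewrite author's own statement) =====
-- stated objective: alternative
-- what changed: Replaces 13 independent substring searches ('pattern in path' per pattern) with a single left-to-right scan over the positions of path, testing at each position whether any pattern starts there via one startswith call on the pattern tuple.
import Mathlib
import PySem

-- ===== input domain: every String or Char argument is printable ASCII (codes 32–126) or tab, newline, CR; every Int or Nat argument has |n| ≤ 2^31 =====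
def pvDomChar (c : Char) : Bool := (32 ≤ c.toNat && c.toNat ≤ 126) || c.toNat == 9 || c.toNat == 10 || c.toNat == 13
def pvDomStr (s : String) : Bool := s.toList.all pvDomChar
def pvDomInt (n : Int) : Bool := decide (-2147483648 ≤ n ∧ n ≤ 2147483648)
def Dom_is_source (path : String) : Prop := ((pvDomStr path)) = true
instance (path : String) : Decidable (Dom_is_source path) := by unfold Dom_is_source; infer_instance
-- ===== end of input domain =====

-- B replaces A's 13 independent 'pattern in path' substring searches by one
-- left-to-right scan over the positions of path, testing at each position whether
-- any pattern starts there (objective: alternative, same cost).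

-- ===== PORT A =====
def staticPatterns : List String :=
  [".png", "__debug__", ".jpg", ".js", ".css", ".scss", ".webp",
   ".WEBP", ".ico", ".jpeg", "styles", "static", "media"]

-- A's 'for … : if p in path: return True' loop as structural recursion
def isSourceLoop (pats : List String) (path : String) : Bool :=
  match pats with
  | [] => false
  | p :: rest => if PySem.Str.isIn p path then true else isSourceLoop rest path

def is_source (path : String) : Bool := isSourceLoop staticPatterns path

-- ===== PORT B =====
def altPatterns : List (List Char) :=
  [".png".toList, "__debug__".toList, ".jpg".toList, ".js".toList, ".css".toList,
   ".scss".toList, ".webp".toList, ".WEBP".toList, ".ico".toList, ".jpeg".toList,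
   "styles".toList, "static".toList, "media".toList]

-- B's 'any(path.startswith(pats, i) for i in range(len(path)))': scan the
-- positions of path left to right (each position = a nonempty suffix)
def scanPositions (pats : List (List Char)) : List Char → Bool
  | [] => false
  | c :: rest => pats.any (fun p => PySem.Chars.startswith (c :: rest) p) || scanPositions pats rest

def is_source_alt (path : String) : Bool := scanPositions altPatterns path.toList

-- ===== PRECONDITION & SPEC =====
def Spec_is_source (path : String) (out : Bool) : Prop := out = is_source_alt path
instance (path : String) (out : Bool) : Decidable (Spec_is_source path out) := by unfold Spec_is_source; infer_instance

-- ===== CLAIM (what is proved, stated in full; the proofs are below) =====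
def Claim_equal_is_source : Prop := ∀ (path : String), Dom_is_source path → Spec_is_source path (is_source path)

-- ===== LEMMAS AND PROOFS =====

theorem isSourceLoop_iff (pats : List String) (path : String) :
    isSourceLoop pats path = true ↔ ∃ p ∈ pats, p.toList <:+: path.toList := by
  induction pats with
  | nil => simp [isSourceLoop]
  | cons p rest ih =>
    simp only [isSourceLoop]
    by_cases h : p.toList <:+: path.toList
    · simp [(PySem.Chars.isIn_iff_infix p.toList path.toList).2 h, h]
    · have h' : PySem.Chars.isIn p.toList path.toList = false :=
        Bool.eq_false_iff.2 (fun hi => h ((PySem.Chars.isIn_iff_infix _ _).1 hi))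
      simp [h', ih, h]

theorem scanPositions_iff (pats : List (List Char)) (hne : ∀ p ∈ pats, p ≠ [])
    (s : List Char) : scanPositions pats s = true ↔ ∃ p ∈ pats, p <:+: s := by
  induction s with
  | nil =>
    simp only [scanPositions, List.infix_nil]
    constructor
    · intro h; exact absurd h (by simp)
    · rintro ⟨p, hp, rfl⟩; exact absurd rfl (hne [] hp)
  | cons c rest ih =>
    simp only [scanPositions, Bool.or_eq_true, List.any_eq_true, ih]
    constructor
    · rintro (⟨p, hp, hs⟩ | ⟨p, hp, hs⟩)
      · exact ⟨p, hp, ((PySem.Chars.startswith_iff _ _).mp hs).isInfix⟩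
      · exact ⟨p, hp, hs.trans (List.suffix_cons c rest).isInfix⟩
    · rintro ⟨p, hp, hs⟩
      rcases List.infix_cons_iff.mp hs with h | h
      · exact Or.inl ⟨p, hp, (PySem.Chars.startswith_iff _ _).mpr h⟩
      · exact Or.inr ⟨p, hp, h⟩

theorem altPatterns_eq : altPatterns = staticPatterns.map String.toList := by decide
theorem altPatterns_ne_nil : ∀ p ∈ altPatterns, p ≠ [] := by decide

-- ===== VERDICT (by name: the statement is the Claim_ definition above) =====
theorem is_source_spec : Claim_equal_is_source := by
  intro path _
  unfold Spec_is_source is_source is_source_alt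
  rw [Bool.eq_iff_iff, isSourceLoop_iff, scanPositions_iff altPatterns altPatterns_ne_nil]
  rw [altPatterns_eq]
  simp
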